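-- pv_equiv track=rewrite | github.com/zhouhm2026/AI-Reader-V2 | backend/src/extraction/chapter_fact_extractor.py | _split_chapter_text
-- ===== SOURCE A (Python) =====
-- _SEGMENT_THRESHOLD_2 = 7000   # >7000 chars -> split into 2 segments
--
-- _SEGMENT_THRESHOLD_3 = 12000  # >12000 chars -> split into 3 segments
--
-- def _split_chapter_text(text: str) -> list[str]:
--     """Split long chapter text into segments at paragraph boundaries.
--
--     Returns a list of 1-3 segments depending on text length.
--     """
--     text_len = len(text)
--     if text_len <= _SEGMENT_THRESHOLD_2:
--         return [text]
--
--     num_parts = 3 if text_len > _SEGMENT_THRESHOLD_3 else 2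
--
--     # Find paragraph break points (double newline or single newline)
--     breaks: list[int] = []
--     for i, ch in enumerate(text):
--         if ch == "\n" and i > 0:
--             breaks.append(i)
--
--     if not breaks:
--         # No paragraph breaks — split by character count
--         seg_len = text_len // num_parts
--         return [text[i * seg_len: (i + 1) * seg_len if i < num_parts - 1 else text_len]
--                 for i in range(num_parts)]
--
--     # Pick break points closest to ideal split positions
--     segments: list[str] = []
--     prev = 0
--     for part_idx in range(1, num_parts):
--         ideal = text_len * part_idx // num_parts
--         # Find the paragraph break closest to ideal position
--         best = min(breaks, key=lambda b: abs(b - ideal))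
--         segments.append(text[prev:best].strip())
--         prev = best
--     segments.append(text[prev:].strip())
--
--     return [s for s in segments if s]  # remove empty segments
-- ===== SOURCE B (Python) =====
-- import bisect
--
-- _SEGMENT_THRESHOLD_2 = 7000   # >7000 chars -> split into 2 segments
--
-- _SEGMENT_THRESHOLD_3 = 12000  # >12000 chars -> split into 3 segments
--
--
-- def _closest_break(breaks, ideal):
--     """breaks is ascending: binary-search the insertion point and compare the
--     two neighbouring breaks, ties going to the lower one (as min() would)."""
--     idx = bisect.bisect_left(breaks, ideal)
--     if idx == 0:
--         return breaks[0]
--     if idx == len(breaks):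
--         return breaks[-1]
--     lo = breaks[idx - 1]
--     hi = breaks[idx]
--     return lo if ideal - lo <= hi - ideal else hi
--
--
-- def _split_chapter_text(text: str) -> list[str]:
--     """Split long chapter text into segments at paragraph boundaries.
--
--     Builds the full list of cut boundaries first, then slices the text
--     between consecutive boundaries (no running accumulator)."""
--     n = len(text)
--     if n <= _SEGMENT_THRESHOLD_2:
--         return [text]
--
--     num_parts = 3 if n > _SEGMENT_THRESHOLD_3 else 2
--
--     breaks = [i for i, ch in enumerate(text) if ch == "\n" and i > 0]
--
--     if not breaks:
--         seg_len = n // num_parts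
--         bounds = [i * seg_len for i in range(num_parts)] + [n]
--         return [text[a:b] for a, b in zip(bounds, bounds[1:])]
--
--     cuts = [_closest_break(breaks, n * k // num_parts) for k in range(1, num_parts)]
--     bounds = [0] + cuts + [n]
--     segs = [text[a:b].strip() for a, b in zip(bounds, bounds[1:])]
--     return [s for s in segs if s]
-- ===== Notes on version B (the rewrite author's own statement) =====
-- stated objective: alternative
-- what changed: B first computes the full list of cut boundaries (each found by bisect.bisect_left on the ascending break list with a two-neighbour comparison, ties to the lower break, matching min's first-wins) and then slices the text between consecutive zipped boundaries, replacing A's fold with a (segments, prev) accumulator and its per-part linear min(breaks, key=...) scan.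
import Mathlib
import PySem

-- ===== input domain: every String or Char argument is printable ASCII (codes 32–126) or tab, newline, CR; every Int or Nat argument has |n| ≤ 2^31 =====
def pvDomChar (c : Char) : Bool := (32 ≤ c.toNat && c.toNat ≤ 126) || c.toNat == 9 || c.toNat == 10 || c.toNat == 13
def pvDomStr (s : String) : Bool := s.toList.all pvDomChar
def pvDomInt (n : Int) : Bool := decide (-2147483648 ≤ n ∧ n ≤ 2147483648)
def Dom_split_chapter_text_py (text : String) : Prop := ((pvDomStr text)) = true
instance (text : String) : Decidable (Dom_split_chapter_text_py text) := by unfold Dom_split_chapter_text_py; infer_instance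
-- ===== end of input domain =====

-- B computes the full list of cut boundaries first (each by a bisect_left binary
-- search over the ascending break list, ties to the lower break) and slices the
-- text between consecutive zipped boundaries, instead of A's fold with a
-- (segments, prev) accumulator and per-part linear min() scan. Objective:
-- alternative (no speedup is claimed).

-- ===== PORT A =====
def split_chapter_text_py (text : String) : List String :=
  let text_len : Int := PySem.Str.len text
  if text_len ≤ 7000 then [text]
  else
    let num_parts : Int := if text_len > 12000 then 3 else 2
    -- for i, ch in enumerate(text): if ch == '\n' and i > 0: breaks.append(i)
    let breaks : List Int :=
      (PySem.List.enumerate text.toList 0).foldl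
        (fun acc p => if p.2 == '\n' && decide (p.1 > 0) then acc ++ [p.1] else acc) []
    if breaks = [] then
      let seg_len := PySem.Int.floordiv text_len num_parts
      (PySem.List.pyRange 0 num_parts 1).map (fun i =>
        PySem.Str.slice text (some (i * seg_len))
          (some (if i < num_parts - 1 then (i + 1) * seg_len else text_len)))
    else
      let st :=
        (PySem.List.pyRange 1 num_parts 1).foldl
          (fun (st : List String × Int) part_idx =>
            let ideal := PySem.Int.floordiv (text_len * part_idx) num_parts
            -- min(breaks, key=lambda b: abs(b - ideal)); breaks ≠ [] here, so the
            -- .getD 0 totalization (Python min raises only on an empty list) is unreachable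
            let best := (PySem.List.min? breaks (fun b => |b - ideal|)).getD 0
            (st.1 ++ [PySem.Str.strip (PySem.Str.slice text (some st.2) (some best))], best))
          ([], 0)
      let segments := st.1 ++ [PySem.Str.strip (PySem.Str.slice text (some st.2) none)]
      segments.filter (fun s => decide (s ≠ ""))

-- ===== PORT B =====
-- helper _closest_break of Source B: bisect_left on the ascending break list, then
-- compare the two neighbouring breaks, ties going to the lower one.
-- All list indices are in range when called (breaks nonempty), so pyGetD's
-- default 0 (Python would raise IndexError) is unreachable.
def closestBreak_alt (breaks : List Int) (ideal : Int) : Int :=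
  let idx := PySem.List.bisectLeft breaks ideal
  if idx = 0 then PySem.List.pyGetD breaks 0 0
  else if idx = breaks.length then PySem.List.pyGetD breaks (-1) 0
  else
    let lo := PySem.List.pyGetD breaks ((idx : Int) - 1) 0
    let hi := PySem.List.pyGetD breaks (idx : Int) 0
    if ideal - lo ≤ hi - ideal then lo else hi

def split_chapter_text_py_alt (text : String) : List String :=
  let n : Int := PySem.Str.len text
  if n ≤ 7000 then [text]
  else
    let num_parts : Int := if n > 12000 then 3 else 2
    -- breaks = [i for i, ch in enumerate(text) if ch == '\n' and i > 0]
    let breaks : List Int :=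
      ((PySem.List.enumerate text.toList 0).filter
        (fun p => p.2 == '\n' && decide (p.1 > 0))).map (·.1)
    if breaks = [] then
      let seg_len := PySem.Int.floordiv n num_parts
      let bounds : List Int :=
        ((PySem.List.pyRange 0 num_parts 1).map (fun i => i * seg_len)) ++ [n]
      (bounds.zip bounds.tail).map (fun ab =>
        PySem.Str.slice text (some ab.1) (some ab.2))
    else
      let cuts : List Int :=
        (PySem.List.pyRange 1 num_parts 1).map (fun k =>
          closestBreak_alt breaks (PySem.Int.floordiv (n * k) num_parts))
      let bounds : List Int := 0 :: cuts ++ [n]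
      let segs := (bounds.zip bounds.tail).map (fun ab =>
        PySem.Str.strip (PySem.Str.slice text (some ab.1) (some ab.2)))
      segs.filter (fun s => decide (s ≠ ""))

-- ===== PRECONDITION & SPEC =====
def Spec_split_chapter_text_py (text : String) (out : List String) : Prop := out = split_chapter_text_py_alt text
instance (text : String) (out : List String) : Decidable (Spec_split_chapter_text_py text out) := by unfold Spec_split_chapter_text_py; infer_instance

-- ===== CLAIM (what is proved, stated in full; the proofs are below) =====
def Claim_equal_split_chapter_text_py : Prop := ∀ (text : String), Dom_split_chapter_text_py text → Spec_split_chapter_text_py text (split_chapter_text_py text)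

-- ===== LEMMAS AND PROOFS =====

-- folding min?'s step from an already-minimal accumulator keeps it
lemma minFold_keep {α κ : Type} [LinearOrder κ] (key : α → κ) (m0 : α) (zs : List α)
    (h : ∀ z ∈ zs, key m0 ≤ key z) :
    zs.foldl (fun acc x => match acc with
      | none => some x
      | some m => if key x < key m then some x else some m) (some m0) = some m0 := by
  induction zs with
  | nil => rfl
  | cons z zs ih =>
    simp only [List.foldl_cons]
    rw [if_neg (not_lt.2 (h z (List.mem_cons_self)))]
    exact ih fun z hz => h z (List.mem_cons_of_mem _ hz)

-- min? returns the FIRST minimizer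
lemma min?_eq_of_split {α κ : Type} [LinearOrder κ] (key : α → κ) (ys zs : List α) (m0 : α)
    (hy : ∀ y ∈ ys, key m0 < key y) (hz : ∀ z ∈ zs, key m0 ≤ key z) :
    PySem.List.min? (ys ++ m0 :: zs) key = some m0 := by
  have hfold : PySem.List.min? (ys ++ m0 :: zs) key
      = (m0 :: zs).foldl (fun acc x => match acc with
          | none => some x
          | some m => if key x < key m then some x else some m)
        (PySem.List.min? ys key) := by
    simp only [PySem.List.min?, List.foldl_append]
    rfl
  rw [hfold]
  rcases hys : PySem.List.min? ys key with _ | a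
  · simp only [List.foldl_cons]
    exact minFold_keep key m0 zs hz
  · have ha : a ∈ ys := PySem.List.min?_mem hys
    simp only [List.foldl_cons]
    rw [if_pos (hy a ha)]
    exact minFold_keep key m0 zs hz

lemma min?_eq_of_index {α κ : Type} [LinearOrder κ] (key : α → κ) (xs : List α) (k : Nat)
    (hk : k < xs.length)
    (hb : ∀ j (hj : j < xs.length), j < k → key xs[k] < key xs[j])
    (ha : ∀ j (hj : j < xs.length), k ≤ j → key xs[k] ≤ key xs[j]) :
    PySem.List.min? xs key = some xs[k] := by
  have hsplit : xs = xs.take k ++ xs[k] :: xs.drop (k + 1) := by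
    rw [List.getElem_cons_drop, List.take_append_drop]
  conv_lhs => rw [hsplit]
  apply min?_eq_of_split
  · intro y hy
    obtain ⟨j, hj, rfl⟩ := List.mem_take_iff_getElem.1 hy
    exact hb j (by omega) (by omega)
  · intro z hz
    obtain ⟨j, hj, rfl⟩ := List.mem_iff_getElem.1 hz
    rw [List.getElem_drop]
    have hj' : k + 1 + j < xs.length := by
      have := hj; simp only [List.length_drop] at this; omega
    exact ha (k + 1 + j) hj' (by omega)

-- the heart: on a nonempty strictly increasing list, B's bisect-based neighbour
-- pick is exactly the first minimizer of |b - t| that A's min() returns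
lemma min?_abs_eq_closest (xs : List Int) (t : Int)
    (hne : xs ≠ []) (hlt : xs.Pairwise (· < ·)) :
    (PySem.List.min? xs (fun b => |b - t|)).getD 0 = closestBreak_alt xs t := by
  have hle : xs.Pairwise (· ≤ ·) := hlt.imp le_of_lt
  have hmono := List.pairwise_iff_getElem.1 hlt
  obtain ⟨hidx_le, hlo, hhi⟩ := PySem.List.bisectLeft_spec xs t hle
  have hlen : 0 < xs.length := List.length_pos_iff.2 hne
  set idx := PySem.List.bisectLeft xs t with hidx
  unfold closestBreak_alt
  rw [← hidx]
  by_cases h0 : idx = 0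
  · -- every element is ≥ t; the head is closest
    rw [if_pos h0]
    rw [min?_eq_of_index (fun b => |b - t|) xs 0 hlen
      (by omega)
      (by
        intro j hj _
        simp only []
        have h1 : t ≤ xs[0] := hhi 0 hlen (by omega)
        have h2 : xs[0] ≤ xs[j] := by
          rcases Nat.eq_zero_or_pos j with rfl | hp
          · exact le_refl _
          · exact le_of_lt (hmono 0 j hlen hj hp)
        rcases abs_cases (xs[0] - t) with ⟨e1, _⟩ | ⟨e1, _⟩ <;>
          rcases abs_cases (xs[j] - t) with ⟨e2, _⟩ | ⟨e2, _⟩ <;> omega)]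
    rw [show (0:Int) = ((0:Nat):Int) by norm_num, PySem.List.pyGetD_natCast]
    simp [List.getD_eq_getElem?_getD, List.getElem?_eq_getElem hlen]
  · rw [if_neg h0]
    by_cases hL : idx = xs.length
    · -- every element is < t; the last is closest
      rw [if_pos hL]
      have hklt : xs.length - 1 < xs.length := by omega
      rw [min?_eq_of_index (fun b => |b - t|) xs (xs.length - 1) hklt
        (by
          intro j hj hjk
          simp only []
          have h1 : xs[xs.length - 1] < t := hlo _ hklt (by omega)
          have h2 : xs[j] < xs[xs.length - 1] := hmono j _ hj hklt (by omega)
          rcases abs_cases (xs[xs.length - 1] - t) with ⟨e1, _⟩ | ⟨e1, _⟩ <;>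
            rcases abs_cases (xs[j] - t) with ⟨e2, _⟩ | ⟨e2, _⟩ <;> omega)
        (by
          intro j hj hjk
          have : j = xs.length - 1 := by omega
          subst this; exact le_refl _)]
      have hneg : PySem.List.pyGetD xs (-1) 0 = xs[xs.length - 1] := by
        have h1 : PySem.List.pyIdx? xs.length (-1) = some (xs.length - 1) := by
          simp [PySem.List.pyIdx?, show -(xs.length:Int) ≤ -1 by omega]
        simp [PySem.List.pyGetD, PySem.List.pyGet?, h1,
          List.getElem?_eq_getElem hklt]
      rw [hneg, Option.getD_some]
    · -- xs[idx-1] < t ≤ xs[idx]: compare the two neighbours, ties to the lower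
      rw [if_neg hL]
      have hidx1 : idx - 1 < xs.length := by omega
      have hidxlt : idx < xs.length := by omega
      have hlo_lt : xs[idx - 1] < t := hlo _ hidx1 (by omega)
      have hhi_ge : t ≤ xs[idx] := hhi _ hidxlt (by omega)
      have hglo : PySem.List.pyGetD xs ((idx : Int) - 1) 0 = xs[idx - 1] := by
        rw [show ((idx : Int) - 1) = ((idx - 1 : Nat) : Int) by omega,
          PySem.List.pyGetD_natCast]
        simp [List.getD_eq_getElem?_getD, List.getElem?_eq_getElem hidx1]
      have hghi : PySem.List.pyGetD xs (idx : Int) 0 = xs[idx] := by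
        rw [PySem.List.pyGetD_natCast]
        simp [List.getD_eq_getElem?_getD, List.getElem?_eq_getElem hidxlt]
      rw [hglo, hghi]
      by_cases htie : t - xs[idx - 1] ≤ xs[idx] - t
      · rw [if_pos htie]
        rw [min?_eq_of_index (fun b => |b - t|) xs (idx - 1) hidx1
          (by
            intro j hj hjk
            simp only []
            have h2 : xs[j] < xs[idx - 1] := hmono j _ hj hidx1 hjk
            have h3 : xs[j] < t := hlo j hj (by omega)
            rcases abs_cases (xs[idx - 1] - t) with ⟨e1, _⟩ | ⟨e1, _⟩ <;>
              rcases abs_cases (xs[j] - t) with ⟨e2, _⟩ | ⟨e2, _⟩ <;> omega)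
          (by
            intro j hj hjk
            simp only []
            rcases Nat.lt_or_ge j idx with hj2 | hj2
            · have : j = idx - 1 := by omega
              subst this; exact le_refl _
            · have h2 : t ≤ xs[j] := hhi j hj hj2
              have h3 : xs[idx] ≤ xs[j] := by
                rcases Nat.eq_or_lt_of_le hj2 with heq | hp
                · subst heq; exact le_refl _
                · exact le_of_lt (hmono idx j hidxlt hj hp)
              rcases abs_cases (xs[idx - 1] - t) with ⟨e1, _⟩ | ⟨e1, _⟩ <;>
                rcases abs_cases (xs[j] - t) with ⟨e2, _⟩ | ⟨e2, _⟩ <;> omega)]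
        exact Option.getD_some
      · rw [if_neg htie]
        rw [min?_eq_of_index (fun b => |b - t|) xs idx hidxlt
          (by
            intro j hj hjk
            simp only []
            have h2 : xs[j] ≤ xs[idx - 1] := by
              rcases Nat.eq_or_lt_of_le (by omega : j ≤ idx - 1) with heq | hp
              · subst heq; exact le_refl _
              · exact le_of_lt (hmono j _ hj hidx1 hp)
            have h3 : xs[j] < t := hlo j hj hjk
            rcases abs_cases (xs[idx] - t) with ⟨e1, _⟩ | ⟨e1, _⟩ <;>
              rcases abs_cases (xs[j] - t) with ⟨e2, _⟩ | ⟨e2, _⟩ <;> omega)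
          (by
            intro j hj hjk
            simp only []
            have h2 : t ≤ xs[j] := hhi j hj hjk
            have h3 : xs[idx] ≤ xs[j] := by
              rcases Nat.eq_or_lt_of_le hjk with heq | hp
              · subst heq; exact le_refl _
              · exact le_of_lt (hmono idx j hidxlt hj hp)
            rcases abs_cases (xs[idx] - t) with ⟨e1, _⟩ | ⟨e1, _⟩ <;>
              rcases abs_cases (xs[j] - t) with ⟨e2, _⟩ | ⟨e2, _⟩ <;> omega)]
        exact Option.getD_some

-- slicing to the (cast) length is the same as slicing to the end
lemma listSlice_to_len {α : Type} (xs : List α) (a : Int) :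
    PySem.List.slice xs (some a) (some ((xs.length : Int))) = PySem.List.slice xs (some a) none := by
  simp [PySem.List.slice, PySem.List.clampIdx]
  split_ifs <;> omega

lemma strSlice_to_len (s : String) (a : Int) :
    PySem.Str.slice s (some a) (some (PySem.Str.len s)) = PySem.Str.slice s (some a) none := by
  have h : ((s.length : Int)) = ((s.toList.length : Int)) := by simp
  simp [PySem.Str.slice, PySem.Str.len, h, listSlice_to_len]

-- ===== VERDICT (by name: the statement is the Claim_ definition above) =====
theorem split_chapter_text_py_spec : Claim_equal_split_chapter_text_py := by
  intro text _
  show split_chapter_text_py text = split_chapter_text_py_alt text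
  unfold split_chapter_text_py split_chapter_text_py_alt
  by_cases h1 : PySem.Str.len text ≤ 7000
  · simp only [if_pos h1]
  · simp only [if_neg h1]
    have hbr :
        (PySem.List.enumerate text.toList 0).foldl
          (fun acc p => if p.2 == '\n' && decide (p.1 > 0) then acc ++ [p.1] else acc) []
        = ((PySem.List.enumerate text.toList 0).filter
            (fun p => p.2 == '\n' && decide (p.1 > 0))).map (·.1) := by
      rw [PySem.List.foldl_append_if]
      simp
    rw [hbr]
    set bs := ((PySem.List.enumerate text.toList 0).filter
        (fun p => p.2 == '\n' && decide (p.1 > 0))).map (·.1) with hbs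
    by_cases hb : bs = []
    · simp only [if_pos hb]
      by_cases h2 : PySem.Str.len text > 12000
      · simp only [if_pos h2]
        rw [show PySem.List.pyRange 0 3 1 = [0, 1, 2] from by decide]
        simp only [List.map_cons, List.map_nil, List.cons_append,
          List.nil_append, List.tail_cons, List.zip_cons_cons, List.zip_nil_right]
        norm_num
      · simp only [if_neg h2]
        rw [show PySem.List.pyRange 0 2 1 = [0, 1] from by decide]
        simp only [List.map_cons, List.map_nil, List.cons_append,
          List.nil_append, List.tail_cons, List.zip_cons_cons, List.zip_nil_right]
        norm_num
    · simp only [if_neg hb]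
      have hsort : bs.Pairwise (· < ·) := by
        rw [hbs, List.pairwise_map]
        exact (PySem.List.pairwise_lt_enumerate text.toList 0).filter _
      by_cases h2 : PySem.Str.len text > 12000
      · simp only [if_pos h2]
        rw [show PySem.List.pyRange 1 3 1 = [1, 2] from by decide]
        simp only [List.foldl_cons, List.foldl_nil, List.map_cons, List.map_nil,
          List.cons_append, List.nil_append, List.tail_cons, List.zip_cons_cons,
          List.zip_nil_right]
        rw [min?_abs_eq_closest bs _ hb hsort, min?_abs_eq_closest bs _ hb hsort,
          strSlice_to_len]
      · simp only [if_neg h2]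
        rw [show PySem.List.pyRange 1 2 1 = [1] from by decide]
        simp only [List.foldl_cons, List.foldl_nil, List.map_cons, List.map_nil,
          List.cons_append, List.nil_append, List.tail_cons, List.zip_cons_cons,
          List.zip_nil_right]
        rw [min?_abs_eq_closest bs _ hb hsort, strSlice_to_len]
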